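-- pv_equiv track=rewrite | github.com/SafonovVladimir/mornings | 04 april/06/2.py | get_reversed_color
-- ===== SOURCE A (Python) =====
-- def get_reversed_color(hex_color: str) -> str:
--     hex_chars = "0123456789ABCDEF"
--
--     if len(hex_color) > 6:
--         raise ValueError
--
--     for char in hex_color:
--         if char.upper() not in hex_chars:
--             raise ValueError
--
--     result = "#"
--
--     if len(hex_color) < 6:
--         hex_color = hex_color.zfill(6)
--
--     for char in hex_color:
--         result += hex_chars[15 - hex_chars.find(char.upper())]
--
--     return result
-- ===== SOURCE B (Python) =====
-- def get_reversed_color(hex_color: str) -> str: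
--     hex_chars = "0123456789ABCDEF"
--
--     if len(hex_color) > 6:
--         raise ValueError
--
--     for char in hex_color:
--         if char.upper() not in hex_chars:
--             raise ValueError
--
--     n = int(hex_color or "0", 16)
--     return "#" + format(0xFFFFFF - n, "06X")
-- ===== Notes on version B (the rewrite author's own statement) =====
-- stated objective: simpler
-- what changed: Replaces the pad-then-per-character table-lookup inversion loop by a single closed-form arithmetic complement: parse the whole string as one 24-bit integer and return 0xFFFFFF - n formatted as six uppercase hex digits.
import Mathlib
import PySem

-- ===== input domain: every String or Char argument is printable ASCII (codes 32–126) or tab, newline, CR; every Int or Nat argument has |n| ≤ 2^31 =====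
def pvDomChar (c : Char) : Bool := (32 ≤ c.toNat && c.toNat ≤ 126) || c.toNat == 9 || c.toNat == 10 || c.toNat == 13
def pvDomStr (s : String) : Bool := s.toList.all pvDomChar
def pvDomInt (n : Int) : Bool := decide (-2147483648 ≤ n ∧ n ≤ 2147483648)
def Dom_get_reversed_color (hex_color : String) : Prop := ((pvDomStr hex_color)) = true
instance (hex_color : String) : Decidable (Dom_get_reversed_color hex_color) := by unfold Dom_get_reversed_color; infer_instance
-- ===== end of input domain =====

-- B replaces A's pad-then-per-character table-lookup inversion loop by one arithmetic
-- complement of the whole 24-bit value (simpler closed form; same validation, same results).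

-- ===== PORT A =====
-- the literal "0123456789ABCDEF"
def pvHexChars : List Char :=
  ['0','1','2','3','4','5','6','7','8','9','A','B','C','D','E','F']

-- port of A; the two 'raise ValueError' paths return "" (excluded by Pre_).
-- 'char.upper() not in hex_chars' for a 1-char needle is char membership;
-- 'hex_chars.find(char.upper())' for a 1-char needle is List.idxOf (first index) — exact there.
def get_reversed_color (hex_color : String) : String :=
  let l := hex_color.toList
  if 6 < l.length then ""                          -- raise ValueError
  else if l.any (fun c => !(pvHexChars.contains (PySem.Chars.upperChar c))) then ""  -- raise ValueError
  else
    let l6 := if l.length < 6 then PySem.Chars.zfill l 6 else l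
    let res := l6.foldl
      (fun r c => r ++ [pvHexChars.getD (15 - pvHexChars.idxOf (PySem.Chars.upperChar c)) '0']) ['#']
    String.mk res

-- ===== PORT B =====
-- digit value as int(·, 16) assigns it — exact on the validated hex-digit characters
def pvHexVal (c : Char) : Nat := pvHexChars.idxOf (PySem.Chars.upperChar c)

-- int(s, 16) on a validated hex string: left-to-right Horner fold
def pvParseHex (l : List Char) : Nat := l.foldl (fun n c => 16 * n + pvHexVal c) 0

-- format(m, '06X') for m < 16^6: six hex digits, low digit peeled first, built back-to-front
def pvFmt6 : Nat → Nat → List Char → List Char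
  | 0, _, acc => acc
  | k + 1, m, acc => pvFmt6 k (m / 16) (pvHexChars.getD (m % 16) '0' :: acc)

def get_reversed_color_alt (hex_color : String) : String :=
  let l := hex_color.toList
  if 6 < l.length then ""                          -- raise ValueError
  else if l.any (fun c => !(pvHexChars.contains (PySem.Chars.upperChar c))) then ""  -- raise ValueError
  else
    let n := if l = [] then 0 else pvParseHex l    -- int(hex_color or "0", 16)
    String.mk ('#' :: pvFmt6 6 (0xFFFFFF - n) [])

-- ===== PRECONDITION & SPEC =====
-- exactly the inputs on which A returns (no ValueError): at most 6 chars, all hex digits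
def Pre_get_reversed_color (hex_color : String) : Prop :=
  hex_color.toList.length ≤ 6 ∧
  (hex_color.toList.all fun c => pvHexChars.contains (PySem.Chars.upperChar c)) = true

instance (hex_color : String) : Decidable (Pre_get_reversed_color hex_color) := by
  unfold Pre_get_reversed_color; infer_instance

def pvWitness_get_reversed_color : String := "1A2b3C"

def Spec_get_reversed_color (hex_color : String) (out : String) : Prop :=
  out = get_reversed_color_alt hex_color
instance (hex_color : String) (out : String) : Decidable (Spec_get_reversed_color hex_color out) := by
  unfold Spec_get_reversed_color; infer_instance

-- ===== CLAIM (what is proved, stated in full; the proofs are below) =====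
def Claim_equal_get_reversed_color : Prop :=
  ∀ (hex_color : String), Dom_get_reversed_color hex_color →
    Pre_get_reversed_color hex_color →
    Spec_get_reversed_color hex_color (get_reversed_color hex_color)

-- ===== LEMMAS AND PROOFS =====

-- the inverted character both programs emit for a source character
def pvInvC (c : Char) : Char := pvHexChars.getD (15 - pvHexVal c) '0'

theorem pvHexVal_lt (c : Char)
    (h : pvHexChars.contains (PySem.Chars.upperChar c) = true) : pvHexVal c < 16 := by
  have := List.idxOf_lt_length_of_mem (List.contains_iff_mem.mp h)
  simpa [pvHexVal, pvHexChars] using this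

theorem pvParseHex_step (l : List Char) (d : Char) :
    pvParseHex (l ++ [d]) = 16 * pvParseHex l + pvHexVal d := by
  simp [pvParseHex, List.foldl_append]

theorem pvParseHex_lt (l : List Char) (h : ∀ c ∈ l, pvHexVal c < 16) :
    pvParseHex l < 16 ^ l.length := by
  induction l using List.reverseRecOn with
  | nil => simp [pvParseHex]
  | append_singleton l d ih =>
    have hd : pvHexVal d < 16 := h d (by simp)
    have hl : pvParseHex l < 16 ^ l.length := ih (fun c hc => h c (by simp [hc]))
    rw [pvParseHex_step]
    simp only [List.length_append, List.length_cons, List.length_nil, pow_succ]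
    omega

theorem pvFmt6_inv (l : List Char) (acc : List Char) (h : ∀ c ∈ l, pvHexVal c < 16) :
    pvFmt6 l.length (16 ^ l.length - 1 - pvParseHex l) acc = l.map pvInvC ++ acc := by
  induction l using List.reverseRecOn generalizing acc with
  | nil => simp [pvFmt6, pvParseHex]
  | append_singleton l d ih =>
    have hd : pvHexVal d < 16 := h d (by simp)
    have hl : pvParseHex l < 16 ^ l.length := pvParseHex_lt l (fun c hc => h c (by simp [hc]))
    have hlen : (l ++ [d]).length = l.length + 1 := by simp
    rw [hlen, pvParseHex_step]
    set v := pvParseHex l with hv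
    have hpow : 16 ^ (l.length + 1) = 16 * 16 ^ l.length := by ring
    have hmod : (16 ^ (l.length + 1) - 1 - (16 * v + pvHexVal d)) % 16 = 15 - pvHexVal d := by
      rw [hpow]; omega
    have hdiv : (16 ^ (l.length + 1) - 1 - (16 * v + pvHexVal d)) / 16
        = 16 ^ l.length - 1 - v := by
      rw [hpow]; omega
    have hsub : ∀ c ∈ l, pvHexVal c < 16 := fun c hc => h c (List.mem_append.mpr (Or.inl hc))
    rw [show pvFmt6 (l.length + 1) (16 ^ (l.length + 1) - 1 - (16 * v + pvHexVal d)) acc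
        = pvFmt6 l.length ((16 ^ (l.length + 1) - 1 - (16 * v + pvHexVal d)) / 16)
            (pvHexChars.getD ((16 ^ (l.length + 1) - 1 - (16 * v + pvHexVal d)) % 16) '0' :: acc)
        from rfl, hmod, hdiv]
    rw [show pvHexChars.getD (15 - pvHexVal d) '0' = pvInvC d from rfl]
    rw [ih (pvInvC d :: acc) hsub]
    simp

theorem pvFoldl_inv (l : List Char) (acc : List Char) :
    l.foldl (fun r c => r ++ [pvInvC c]) acc = acc ++ l.map pvInvC := by
  induction l generalizing acc with
  | nil => simp
  | cons c l ih => simp [List.foldl_cons, ih]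

theorem pvParseHex_replicate_zero (k : Nat) (l : List Char) :
    pvParseHex (List.replicate k '0' ++ l) = pvParseHex l := by
  induction k with
  | zero => simp
  | succ k ih =>
    have : List.replicate (k + 1) '0' ++ l = '0' :: (List.replicate k '0' ++ l) := by
      simp [List.replicate_succ]
    rw [this]
    simpa [pvParseHex, List.foldl_cons, pvHexVal, PySem.Chars.upperChar,
      PySem.Chars.islower, pvHexChars] using ih

-- ===== VERDICT (by name: the statement is the Claim_ definition above) =====
theorem get_reversed_color_spec : Claim_equal_get_reversed_color := by
  intro s _ hpre
  obtain ⟨hlen, hallb⟩ := hpre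
  have hhex : ∀ c ∈ s.toList, pvHexChars.contains (PySem.Chars.upperChar c) = true := by
    simpa using List.all_eq_true.mp hallb
  unfold Spec_get_reversed_color get_reversed_color get_reversed_color_alt
  set l := s.toList with hls
  have h6 : ¬ 6 < l.length := by omega
  have hany : l.any (fun c => !(pvHexChars.contains (PySem.Chars.upperChar c))) = false := by
    simp only [List.any_eq_false]
    intro c hc
    simp only [Bool.not_eq_true', Bool.not_eq_false]
    exact hhex c hc

  simp only [h6, if_false, hany, Bool.false_eq_true, if_false]
  -- the padded list both sides conceptually work on
  have hdig : ∀ c ∈ l, pvHexVal c < 16 := fun c hc => pvHexVal_lt c (hhex c hc)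
  set l6 : List Char := List.replicate (6 - l.length) '0' ++ l with hl6
  have hl6len : l6.length = 6 := by simp [hl6]; omega
  have hl6dig : ∀ c ∈ l6, pvHexVal c < 16 := by
    intro c hc
    rw [hl6, List.mem_append] at hc
    rcases hc with hc | hc
    · have : c = '0' := List.eq_of_mem_replicate hc
      subst this; decide
    · exact hdig c hc
  -- A's padded list is l6
  have hzfill : (if l.length < 6 then PySem.Chars.zfill l 6 else l) = l6 := by
    rw [hl6]
    by_cases hlt : l.length < 6
    · rw [if_pos hlt]
      have hintle : ¬ ((6 : Int) ≤ (l.length : Int)) := by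
        exact_mod_cast (by omega : ¬ (6 ≤ l.length))
      cases hl : l with
      | nil => decide
      | cons c rest =>
        have hc : pvHexChars.contains (PySem.Chars.upperChar c) = true := by
          apply hhex; rw [hl]; simp
        have hnotsign : ¬ (c = '+' ∨ c = '-') := by
          rintro (rfl | rfl) <;> revert hc <;> decide
        rw [hl] at hintle
        unfold PySem.Chars.zfill
        rw [if_neg hintle]
        show (if c = '+' ∨ c = '-' then
              c :: (List.replicate ((6 : Int).toNat - (c :: rest).length) '0' ++ rest)
            else List.replicate ((6 : Int).toNat - (c :: rest).length) '0' ++ c :: rest)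
            = List.replicate (6 - (c :: rest).length) '0' ++ c :: rest
        rw [if_neg hnotsign]
        rfl
    · rw [if_neg hlt]
      have : 6 - l.length = 0 := by omega
      simp [this]
  rw [hzfill]
  -- B's parsed value equals the padded value
  have hn : (if l = [] then 0 else pvParseHex l) = pvParseHex l6 := by
    rw [hl6, pvParseHex_replicate_zero]
    by_cases h : l = []
    · simp [h, pvParseHex]
    · rw [if_neg h]
  rw [hn]
  -- both sides are '#' followed by the digit-wise inversion of l6
  have hA : l6.foldl
      (fun r c => r ++ [pvHexChars.getD (15 - pvHexChars.idxOf (PySem.Chars.upperChar c)) '0']) ['#']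
      = ['#'] ++ l6.map pvInvC := pvFoldl_inv l6 ['#']
  have hB : pvFmt6 6 (0xFFFFFF - pvParseHex l6) [] = l6.map pvInvC := by
    have := pvFmt6_inv l6 [] hl6dig
    rw [hl6len] at this
    simpa using this
  rw [hA, hB]
  rfl
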